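-- pv_equiv track=rewrite | github.com/Dia-Souci/coscape-challenge4 | challenge4.py | generate_maze
-- ===== SOURCE A (Python) =====
-- def generate_maze(n, m, hints):
--     maze = [[0] * m for _ in range(n)]
--
--     for i in range(len(hints)):
--         for j in range(len(hints[0])):
--             hint = hints[i][j]
--             moves = sum(hint)-hint[0]
--             moves = moves % 4
--             if hint[0] == 1:
--                 if moves == 1 or moves == -3:
--                     maze[i*2][j*2+1] =1
--                 elif moves == 2 or moves == -2:
--                     maze[i*2][j*2] =1
--                 elif moves == 3 or moves == -1:
--                     maze[i*2+1][j*2] =1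
--                 elif moves == 0 :
--                     maze[i*2+1][j*2+1] =1
--             elif hint[0] == 2:
--                 if moves == 1 or moves == -3:
--                     maze[i*2][j*2] =1
--                     maze[i*2+1][j*2] =1
--                 elif moves == 2 or moves == -2:
--                     maze[i*2+1][j*2+1] =1
--                     maze[i*2+1][j*2] =1
--                 elif moves == 3 or moves == -1:
--                     maze[i*2][j*2+1] =1
--                     maze[i*2+1][j*2+1] =1
--                 elif moves == 0 :
--                     maze[i*2][j*2] =1
--                     maze[i*2][j*2+1] =1
--             elif hint[0] == 3:
--                 if moves == 1 or moves == -3: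
--                     maze[i*2][j*2+1] =1
--                     maze[i*2][j*2] =1
--                     maze[i*2+1][j*2+1] =1
--                 elif moves == 2 or moves == -2:
--                     maze[i*2][j*2+1] =1
--                     maze[i*2][j*2] =1
--                     maze[i*2+1][j*2] =1
--                 elif moves == 3 or moves == -1:
--                     maze[i*2+1][j*2] =1
--                     maze[i*2][j*2] =1
--                     maze[i*2+1][j*2+1] =1
--                 elif moves == 0 :
--                     maze[i*2][j*2+1] =1
--                     maze[i*2+1][j*2] =1
--                     maze[i*2+1][j*2+1] =1
--
--     return maze
-- ===== SOURCE B (Python) =====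
-- # Gather instead of scatter: each output cell is computed independently by a
-- # closed-form rotation formula (cells of a 2x2 block ordered cyclically
-- # TL,TR,BR,BL; the hint marks the cells whose cyclic distance from a rotation
-- # offset k falls in a fixed set per hint[0]), instead of A's per-hint writes
-- # into a preallocated grid through a 12-branch cascade.
--
-- def _mark(hint, dr, dc):
--     h0 = hint[0]
--     k = (h0 - sum(hint)) % 4
--     p = 2 * dr + (dc ^ dr)          # cyclic position of (dr,dc): TL=0,TR=1,BR=2,BL=3
--     d = (p - k) % 4
--     if h0 == 1:
--         return 1 if d == 2 else 0
--     if h0 == 2: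
--         return 1 if d <= 1 else 0
--     if h0 == 3:
--         return 1 if d != 0 else 0
--     return 0
--
-- def _cell(rows, cols, hints, r, c):
--     if r // 2 >= rows or c // 2 >= cols:
--         return 0
--     return _mark(hints[r // 2][c // 2], r % 2, c % 2)
--
-- def generate_maze(n, m, hints):
--     rows = len(hints)
--     cols = 0 if not hints else len(hints[0])
--     return [[_cell(rows, cols, hints, r, c) for c in range(m)] for r in range(n)]
-- ===== Notes on version B (the rewrite author's own statement) =====
-- stated objective: alternative
-- what changed: A scatters: for each hint it writes 1s into a preallocated grid through a 12-branch cascade; B gathers: every output cell is computed independently from its own 2x2 block by a closed-form rotation formula (cells ordered cyclically TL,TR,BR,BL; a cell is marked iff its cyclic distance from the hint's rotation offset lies in a fixed set per hint[0]).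
import Mathlib
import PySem

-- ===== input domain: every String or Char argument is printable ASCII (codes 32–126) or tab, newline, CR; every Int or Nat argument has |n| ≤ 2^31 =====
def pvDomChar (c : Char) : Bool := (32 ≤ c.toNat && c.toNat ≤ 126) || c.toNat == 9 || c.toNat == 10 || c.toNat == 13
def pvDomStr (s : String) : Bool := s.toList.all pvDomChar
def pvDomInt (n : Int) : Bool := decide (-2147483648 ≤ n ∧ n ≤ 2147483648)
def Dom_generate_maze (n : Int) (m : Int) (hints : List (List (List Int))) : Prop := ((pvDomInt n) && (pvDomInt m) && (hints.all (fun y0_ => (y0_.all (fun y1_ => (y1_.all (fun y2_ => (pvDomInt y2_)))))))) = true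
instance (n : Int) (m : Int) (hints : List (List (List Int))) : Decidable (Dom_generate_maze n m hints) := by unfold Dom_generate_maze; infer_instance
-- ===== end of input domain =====

-- B replaces A's scatter (per-hint writes into a preallocated grid through a 12-branch
-- cascade) by a gather: every output cell is computed independently by a closed-form
-- rotation formula on its 2x2 block (objective: alternative).

-- ===== PORT A =====
-- maze[r][c] = 1 ; r, c are nonnegative and in range on every input admitted by
-- Pre_generate_maze (Python raises IndexError otherwise), where modify/set are exact.
def setCell (maze : List (List Int)) (r c : Nat) : List (List Int) :=
  maze.modify r (fun row => row.set c 1)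

def generate_maze (n : Int) (m : Int) (hints : List (List (List Int))) : List (List Int) :=
  let maze := (List.range n.toNat).map (fun _ => List.replicate m.toNat 0)
  (List.range hints.length).foldl (fun maze i =>
    (List.range (hints.headD []).length).foldl (fun maze j =>
      -- hints[i][j] and hint[0]: in range under Pre_generate_maze (Python raises otherwise)
      let hint := (hints.getD i []).getD j []
      let h0 := hint.headD 0
      let moves := PySem.Int.mod (hint.sum - h0) 4
      if h0 = 1 then
        if moves = 1 ∨ moves = -3 then setCell maze (i*2) (j*2+1)
        else if moves = 2 ∨ moves = -2 then setCell maze (i*2) (j*2)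
        else if moves = 3 ∨ moves = -1 then setCell maze (i*2+1) (j*2)
        else if moves = 0 then setCell maze (i*2+1) (j*2+1)
        else maze
      else if h0 = 2 then
        if moves = 1 ∨ moves = -3 then setCell (setCell maze (i*2) (j*2)) (i*2+1) (j*2)
        else if moves = 2 ∨ moves = -2 then setCell (setCell maze (i*2+1) (j*2+1)) (i*2+1) (j*2)
        else if moves = 3 ∨ moves = -1 then setCell (setCell maze (i*2) (j*2+1)) (i*2+1) (j*2+1)
        else if moves = 0 then setCell (setCell maze (i*2) (j*2)) (i*2) (j*2+1)
        else maze
      else if h0 = 3 then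
        if moves = 1 ∨ moves = -3 then setCell (setCell (setCell maze (i*2) (j*2+1)) (i*2) (j*2)) (i*2+1) (j*2+1)
        else if moves = 2 ∨ moves = -2 then setCell (setCell (setCell maze (i*2) (j*2+1)) (i*2) (j*2)) (i*2+1) (j*2)
        else if moves = 3 ∨ moves = -1 then setCell (setCell (setCell maze (i*2+1) (j*2)) (i*2) (j*2)) (i*2+1) (j*2+1)
        else if moves = 0 then setCell (setCell (setCell maze (i*2) (j*2+1)) (i*2+1) (j*2)) (i*2+1) (j*2+1)
        else maze
      else maze) maze) maze

-- ===== PORT B =====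
-- _mark of Source B; hint[0] is headD 0 (hint is nonempty under Pre_generate_maze)
def bMark (hint : List Int) (dr dc : Nat) : Int :=
  let h0 := hint.headD 0
  let k := PySem.Int.mod (h0 - hint.sum) 4
  let p : Int := 2 * (dr : Int) + ((dc ^^^ dr : Nat) : Int)
  let d := PySem.Int.mod (p - k) 4
  if h0 = 1 then (if d = 2 then 1 else 0)
  else if h0 = 2 then (if d ≤ 1 then 1 else 0)
  else if h0 = 3 then (if d ≠ 0 then 1 else 0)
  else 0

-- _cell of Source B; hints[r//2][c//2] is in range when the guard passes (getD is exact there)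
def bCell (rows cols : Nat) (hints : List (List (List Int))) (r c : Nat) : Int :=
  if rows ≤ r / 2 ∨ cols ≤ c / 2 then 0
  else bMark ((hints.getD (r / 2) []).getD (c / 2) []) (r % 2) (c % 2)

def generate_maze_alt (n : Int) (m : Int) (hints : List (List (List Int))) : List (List Int) :=
  let rows := hints.length
  let cols := if hints = [] then 0 else (hints.headD []).length
  (List.range n.toNat).map (fun r => (List.range m.toNat).map (fun c => bCell rows cols hints r c))

-- ===== PRECONDITION & SPEC =====
-- the cells of the 2x2 block that hint (h0, mv) marks, exactly A's branch assignments (mv = moves % 4 ∈ [0,4))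
def markOffsets (h0 mv : Int) : List (Int × Int) :=
  if h0 = 1 then
    if mv = 1 then [(0, 1)] else if mv = 2 then [(0, 0)] else if mv = 3 then [(1, 0)] else [(1, 1)]
  else if h0 = 2 then
    if mv = 1 then [(0, 0), (1, 0)] else if mv = 2 then [(1, 1), (1, 0)]
    else if mv = 3 then [(0, 1), (1, 1)] else [(0, 0), (0, 1)]
  else if h0 = 3 then
    if mv = 1 then [(0, 1), (0, 0), (1, 1)] else if mv = 2 then [(0, 1), (0, 0), (1, 0)]
    else if mv = 3 then [(1, 0), (0, 0), (1, 1)] else [(0, 1), (1, 0), (1, 1)]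
  else []

-- Pre_ admits exactly the inputs on which Python A returns: every scanned row is long
-- enough, every scanned hint is nonempty, and every cell the hint marks lies inside the
-- n×m grid (outside these, Python A raises IndexError).
def Pre_generate_maze (n : Int) (m : Int) (hints : List (List (List Int))) : Prop :=
  ∀ i < hints.length, ∀ j < (hints.headD []).length,
    j < (hints.getD i []).length ∧ (hints.getD i []).getD j [] ≠ [] ∧
    ∀ d ∈ markOffsets (((hints.getD i []).getD j []).headD 0)
            (PySem.Int.mod (((hints.getD i []).getD j []).sum - ((hints.getD i []).getD j []).headD 0) 4),
      2 * (i : Int) + d.1 < n ∧ 2 * (j : Int) + d.2 < m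
instance (n : Int) (m : Int) (hints : List (List (List Int))) : Decidable (Pre_generate_maze n m hints) := by unfold Pre_generate_maze; infer_instance

def pvWitness_generate_maze : Int × Int × List (List (List Int)) := (2, 2, [[[1, 1]]])

def Spec_generate_maze (n : Int) (m : Int) (hints : List (List (List Int))) (out : List (List Int)) : Prop := out = generate_maze_alt n m hints
instance (n : Int) (m : Int) (hints : List (List (List Int))) (out : List (List Int)) : Decidable (Spec_generate_maze n m hints out) := by unfold Spec_generate_maze; infer_instance

-- ===== CLAIM (what is proved, stated in full; the proofs are below) =====
def Claim_equal_generate_maze : Prop := ∀ (n : Int) (m : Int) (hints : List (List (List Int))), Dom_generate_maze n m hints → Pre_generate_maze n m hints → Spec_generate_maze n m hints (generate_maze n m hints)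

-- ===== LEMMAS AND PROOFS =====

-- the grid drawn from a set of marked cells (the common semantic object of the two proofs)
def render (n m : Int) (s : PySem.Set (Int × Int)) : List (List Int) :=
  (List.range n.toNat).map (fun (r : Nat) =>
    (List.range m.toNat).map (fun (c : Nat) => if PySem.Set.contains s ((r : Int), (c : Int)) then 1 else 0))

-- the per-cell transform of A (definitionally the inner lambda of the port of A)
def cellA (i j : Nat) (hint : List Int) (maze : List (List Int)) : List (List Int) :=
  let h0 := hint.headD 0
  let moves := PySem.Int.mod (hint.sum - h0) 4
  if h0 = 1 then
    if moves = 1 ∨ moves = -3 then setCell maze (i*2) (j*2+1)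
    else if moves = 2 ∨ moves = -2 then setCell maze (i*2) (j*2)
    else if moves = 3 ∨ moves = -1 then setCell maze (i*2+1) (j*2)
    else if moves = 0 then setCell maze (i*2+1) (j*2+1)
    else maze
  else if h0 = 2 then
    if moves = 1 ∨ moves = -3 then setCell (setCell maze (i*2) (j*2)) (i*2+1) (j*2)
    else if moves = 2 ∨ moves = -2 then setCell (setCell maze (i*2+1) (j*2+1)) (i*2+1) (j*2)
    else if moves = 3 ∨ moves = -1 then setCell (setCell maze (i*2) (j*2+1)) (i*2+1) (j*2+1)
    else if moves = 0 then setCell (setCell maze (i*2) (j*2)) (i*2) (j*2+1)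
    else maze
  else if h0 = 3 then
    if moves = 1 ∨ moves = -3 then setCell (setCell (setCell maze (i*2) (j*2+1)) (i*2) (j*2)) (i*2+1) (j*2+1)
    else if moves = 2 ∨ moves = -2 then setCell (setCell (setCell maze (i*2) (j*2+1)) (i*2) (j*2)) (i*2+1) (j*2)
    else if moves = 3 ∨ moves = -1 then setCell (setCell (setCell maze (i*2+1) (j*2)) (i*2) (j*2)) (i*2+1) (j*2+1)
    else if moves = 0 then setCell (setCell (setCell maze (i*2) (j*2+1)) (i*2+1) (j*2)) (i*2+1) (j*2+1)
    else maze
  else maze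

-- the same transform on the set of marked cells
def cellS (i j : Nat) (hint : List Int) (s : PySem.Set (Int × Int)) : PySem.Set (Int × Int) :=
  (markOffsets (hint.headD 0) (PySem.Int.mod (hint.sum - hint.headD 0) 4)).foldl
    (fun s d => PySem.Set.add s (2 * (i : Int) + d.1, 2 * (j : Int) + d.2)) s

-- the set of all marked cells
def markedSet (cols : Nat) (hints : List (List (List Int))) : PySem.Set (Int × Int) :=
  (List.range hints.length).foldl (fun s i =>
    (List.range cols).foldl (fun s j => cellS i j ((hints.getD i []).getD j []) s) s) PySem.Set.empty

lemma render_empty (n m : Int) :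
    (List.range n.toNat).map (fun _ => List.replicate m.toNat 0) = render n m PySem.Set.empty := by
  have hc : ∀ q : Int × Int, PySem.Set.contains (PySem.Set.empty : PySem.Set (Int × Int)) q = false := fun _ => rfl
  unfold render
  simp only [hc, Bool.false_eq_true, if_false]
  rw [show ((List.range m.toNat).map (fun _ => (0 : Int))) = List.replicate m.toNat 0 from by simp]

lemma render_setCell (n m : Int) (s : PySem.Set (Int × Int)) (r c : Nat) :
    setCell (render n m s) r c = render n m (PySem.Set.add s ((r : Int), (c : Int))) := by
  apply List.ext_getElem
  · simp [setCell, render]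
  intro a h1 h2
  simp only [setCell, render, List.length_map, List.length_range] at h1 h2 ⊢
  rw [List.getElem_modify]
  simp only [List.getElem_map, List.getElem_range]
  by_cases hra : r = a
  · subst hra
    rw [if_pos rfl]
    apply List.ext_getElem
    · simp
    intro b hb1 hb2
    simp only [List.length_set, List.length_map, List.length_range] at hb1 hb2
    rw [List.getElem_set]
    simp only [List.getElem_map, List.getElem_range]
    by_cases hcb : c = b
    · subst hcb
      simp [List.contains_eq_mem, PySem.Set.mem_add]
    · have hne : ((r : Int), (b : Int)) ≠ ((r : Int), (c : Int)) := by
        simp only [ne_eq, Prod.mk.injEq, not_and]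
        intro _ hbc
        exact hcb (by exact_mod_cast hbc.symm)
      simp [hcb, List.contains_eq_mem, PySem.Set.mem_add, hne]
  · rw [if_neg hra]
    apply List.ext_getElem
    · simp
    intro b hb1 hb2
    simp only [List.getElem_map, List.getElem_range]
    have hne : ((a : Int), (b : Int)) ≠ ((r : Int), (c : Int)) := by
      simp only [ne_eq, Prod.mk.injEq, not_and]
      intro har _
      exact hra (by exact_mod_cast har.symm)
    simp [List.contains_eq_mem, PySem.Set.mem_add, hne]

lemma cell_eq (n m : Int) (i j : Nat) (hint : List Int) (s : PySem.Set (Int × Int)) :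
    cellA i j hint (render n m s) = render n m (cellS i j hint s) := by
  have a1 : 0 ≤ PySem.Int.mod (hint.sum - hint.headD 0) 4 := PySem.Int.mod_nonneg _ (by norm_num)
  have a2 : PySem.Int.mod (hint.sum - hint.headD 0) 4 < 4 := PySem.Int.mod_lt _ (by norm_num)
  simp only [cellA, cellS, markOffsets]
  by_cases e1 : hint.headD 0 = 1
  · rw [e1] at a1 a2
    simp only [e1]
    generalize hg : PySem.Int.mod (hint.sum - 1) 4 = mv at a1 a2 ⊢
    interval_cases mv <;>
      · norm_num
        simp only [render_setCell]
        push_cast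
        ring_nf
  · by_cases e2 : hint.headD 0 = 2
    · rw [e2] at a1 a2
      simp only [e2]
      generalize hg : PySem.Int.mod (hint.sum - 2) 4 = mv at a1 a2 ⊢
      interval_cases mv <;>
        · norm_num [e1]
          simp only [render_setCell]
          push_cast
          ring_nf
    · by_cases e3 : hint.headD 0 = 3
      · rw [e3] at a1 a2
        simp only [e3]
        generalize hg : PySem.Int.mod (hint.sum - 3) 4 = mv at a1 a2 ⊢
        interval_cases mv <;>
          · norm_num [e1, e2]
            simp only [render_setCell]
            push_cast
            ring_nf
      · simp only [List.foldl_nil, if_neg e1, if_neg e2, if_neg e3]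

-- a fold that is a render-homomorphism step by step is one globally
lemma foldl_render {β : Type} (n m : Int)
    (fA : List (List Int) → β → List (List Int)) (fS : PySem.Set (Int × Int) → β → PySem.Set (Int × Int))
    (h : ∀ s x, fA (render n m s) x = render n m (fS s x)) :
    ∀ (L : List β) (s : PySem.Set (Int × Int)), L.foldl fA (render n m s) = render n m (L.foldl fS s) := by
  intro L
  induction L with
  | nil => intro s; rfl
  | cons x xs ih => intro s; simp only [List.foldl_cons, h]; exact ih _

lemma A_eq_render (n m : Int) (hints : List (List (List Int))) :
    generate_maze n m hints = render n m (markedSet (hints.headD []).length hints) := by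
  show (List.range hints.length).foldl (fun maze i =>
      (List.range (hints.headD []).length).foldl
        (fun maze j => cellA i j ((hints.getD i []).getD j []) maze) maze)
    ((List.range n.toNat).map (fun _ => List.replicate m.toNat 0))
    = render n m (markedSet (hints.headD []).length hints)
  rw [render_empty n m]
  exact foldl_render n m _ _
    (fun s i => foldl_render n m _ _ (fun s j => cell_eq n m i j _ s) _ s) _ _

-- membership in a fold of adds
lemma mem_foldl_add {β : Type} (f : β → Int × Int) :
    ∀ (L : List β) (s : PySem.Set (Int × Int)) (q : Int × Int),
      q ∈ L.foldl (fun s x => PySem.Set.add s (f x)) s ↔ q ∈ s ∨ ∃ x ∈ L, q = f x := by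
  intro L
  induction L with
  | nil => simp
  | cons x xs ih =>
    intro s q
    simp only [List.foldl_cons, ih, PySem.Set.mem_add, List.mem_cons]
    constructor
    · rintro ((h | h) | ⟨y, hy, rfl⟩)
      · exact Or.inl h
      · exact Or.inr ⟨x, Or.inl rfl, h⟩
      · exact Or.inr ⟨y, Or.inr hy, rfl⟩
    · rintro (h | ⟨y, (rfl | hy), rfl⟩)
      · exact Or.inl (Or.inl h)
      · exact Or.inl (Or.inr rfl)
      · exact Or.inr ⟨y, hy, rfl⟩

-- membership in a fold whose step satisfies a membership law
lemma mem_foldl_step {β : Type} (g : PySem.Set (Int × Int) → β → PySem.Set (Int × Int))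
    (P : β → Int × Int → Prop)
    (h : ∀ s x q, q ∈ g s x ↔ q ∈ s ∨ P x q) :
    ∀ (L : List β) (s : PySem.Set (Int × Int)) (q : Int × Int),
      q ∈ L.foldl g s ↔ q ∈ s ∨ ∃ x ∈ L, P x q := by
  intro L
  induction L with
  | nil => simp
  | cons x xs ih =>
    intro s q
    simp only [List.foldl_cons, ih, h, List.mem_cons]
    constructor
    · rintro ((h1 | h1) | ⟨y, hy, hp⟩)
      · exact Or.inl h1
      · exact Or.inr ⟨x, Or.inl rfl, h1⟩
      · exact Or.inr ⟨y, Or.inr hy, hp⟩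
    · rintro (h1 | ⟨y, (rfl | hy), hp⟩)
      · exact Or.inl (Or.inl h1)
      · exact Or.inl (Or.inr hp)
      · exact Or.inr ⟨y, hy, hp⟩

def markedAt (hints : List (List (List Int))) (i j : Nat) (q : Int × Int) : Prop :=
  ∃ d ∈ markOffsets (((hints.getD i []).getD j []).headD 0)
      (PySem.Int.mod (((hints.getD i []).getD j []).sum - ((hints.getD i []).getD j []).headD 0) 4),
    q = (2 * (i : Int) + d.1, 2 * (j : Int) + d.2)

lemma mem_markedSet (cols : Nat) (hints : List (List (List Int))) (q : Int × Int) :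
    q ∈ markedSet cols hints ↔ ∃ i < hints.length, ∃ j < cols, markedAt hints i j q := by
  unfold markedSet
  rw [mem_foldl_step _ (fun i q => ∃ j < cols, markedAt hints i j q)
    (fun s i q => by
      rw [mem_foldl_step _ (fun j q => markedAt hints i j q)
        (fun s j q => by unfold cellS markedAt; exact mem_foldl_add _ _ _ _)]
      simp [List.mem_range])]
  simp [PySem.Set.empty, List.mem_range]

lemma markOffsets_bounds (h0 mv : Int) (d : Int × Int) (h : d ∈ markOffsets h0 mv) :
    (d.1 = 0 ∨ d.1 = 1) ∧ (d.2 = 0 ∨ d.2 = 1) := by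
  unfold markOffsets at h
  split_ifs at h <;> fin_cases h <;> simp

-- the heart: Source B's closed-form formula computes exactly membership in A's offset list
lemma mark_iff (hint : List Int) (dr dc : Nat) (hdr : dr < 2) (hdc : dc < 2) :
    bMark hint dr dc
      = if ((dr : Int), (dc : Int)) ∈ markOffsets (hint.headD 0)
            (PySem.Int.mod (hint.sum - hint.headD 0) 4) then 1 else 0 := by
  have hmod : ∀ a : Int, PySem.Int.mod a 4 = a % 4 := fun a => PySem.Int.mod_eq_emod_of_pos (by norm_num)
  simp only [bMark, markOffsets, hmod]
  generalize hint.headD 0 = h0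
  rw [show h0 - hint.sum = -(hint.sum - h0) from by ring]
  generalize hint.sum - h0 = x
  have h4 : x % 4 = 0 ∨ x % 4 = 1 ∨ x % 4 = 2 ∨ x % 4 = 3 := by omega
  interval_cases dr <;> interval_cases dc <;>
    rcases h4 with h | h | h | h <;>
    simp only [h] <;>
    (first
      | rw [show (-x) % 4 = 0 from by omega]
      | rw [show (-x) % 4 = 3 from by omega]
      | rw [show (-x) % 4 = 2 from by omega]
      | rw [show (-x) % 4 = 1 from by omega]) <;>
    (by_cases e1 : h0 = 1
     · norm_num [e1, Prod.ext_iff]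
     · by_cases e2 : h0 = 2
       · norm_num [e1, e2, Prod.ext_iff]
       · by_cases e3 : h0 = 3
         · norm_num [e1, e2, e3, Prod.ext_iff]
         · norm_num [e1, e2, e3])

lemma bCell_eq_contains (cols : Nat) (hints : List (List (List Int))) (r c : Nat) :
    bCell hints.length cols hints r c
      = if PySem.Set.contains (markedSet cols hints) ((r : Int), (c : Int)) then 1 else 0 := by
  have hcm : PySem.Set.contains (markedSet cols hints) ((r : Int), (c : Int)) = true
      ↔ ((r : Int), (c : Int)) ∈ markedSet cols hints := by
    simp [PySem.Set.contains, List.contains_eq_mem]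
  rw [bCell]
  by_cases hin : hints.length ≤ r / 2 ∨ cols ≤ c / 2
  · rw [if_pos hin]
    have : ¬ PySem.Set.contains (markedSet cols hints) ((r : Int), (c : Int)) = true := by
      rw [hcm, mem_markedSet]
      rintro ⟨i, hi, j, hj, d, hd, hq⟩
      obtain ⟨h1, h2⟩ := markOffsets_bounds _ _ _ hd
      obtain ⟨hq1, hq2⟩ := Prod.mk.injEq .. ▸ hq
      have hri : i = r / 2 := by rcases h1 with h | h <;> rw [h] at hq1 <;> omega
      have hcj : j = c / 2 := by rcases h2 with h | h <;> rw [h] at hq2 <;> omega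
      omega
    rw [if_neg this]
  · rw [if_neg hin]
    obtain ⟨hin1, hin2⟩ : r / 2 < hints.length ∧ c / 2 < cols := by omega
    have hmem : PySem.Set.contains (markedSet cols hints) ((r : Int), (c : Int)) = true
        ↔ (((r % 2 : Nat) : Int), ((c % 2 : Nat) : Int))
            ∈ markOffsets (((hints.getD (r / 2) []).getD (c / 2) []).headD 0)
              (PySem.Int.mod (((hints.getD (r / 2) []).getD (c / 2) []).sum
                 - ((hints.getD (r / 2) []).getD (c / 2) []).headD 0) 4) := by
      rw [hcm, mem_markedSet]
      constructor
      · rintro ⟨i, hi, j, hj, d, hd, hq⟩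
        obtain ⟨h1, h2⟩ := markOffsets_bounds _ _ _ hd
        obtain ⟨hq1, hq2⟩ := Prod.mk.injEq .. ▸ hq
        have hri : i = r / 2 := by rcases h1 with h | h <;> rw [h] at hq1 <;> omega
        have hcj : j = c / 2 := by rcases h2 with h | h <;> rw [h] at hq2 <;> omega
        have hd1 : d.1 = ((r % 2 : Nat) : Int) := by subst hri; omega
        have hd2 : d.2 = ((c % 2 : Nat) : Int) := by subst hcj; omega
        rw [hri, hcj] at hd
        rwa [show (((r % 2 : Nat) : Int), ((c % 2 : Nat) : Int)) = d from by
          rw [Prod.ext_iff]; exact ⟨hd1.symm, hd2.symm⟩]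
      · intro hd
        exact ⟨r / 2, hin1, c / 2, hin2,
          (((r % 2 : Nat) : Int), ((c % 2 : Nat) : Int)), hd, by
            rw [Prod.ext_iff]; constructor <;> (simp only []; push_cast; omega)⟩
    rw [mark_iff _ _ _ (Nat.mod_lt _ (by norm_num)) (Nat.mod_lt _ (by norm_num))]
    by_cases hq : PySem.Set.contains (markedSet cols hints) ((r : Int), (c : Int)) = true
    · rw [if_pos hq, if_pos (hmem.mp hq)]
    · rw [if_neg hq, if_neg (fun h => hq (hmem.mpr h))]

lemma B_eq_render (n m : Int) (hints : List (List (List Int))) :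
    generate_maze_alt n m hints = render n m (markedSet (hints.headD []).length hints) := by
  have hcols : (if hints = [] then 0 else (hints.headD []).length) = (hints.headD []).length := by
    cases hints <;> simp
  show (List.range n.toNat).map (fun r => (List.range m.toNat).map
      (fun c => bCell hints.length (if hints = [] then 0 else (hints.headD []).length) hints r c))
    = render n m (markedSet (hints.headD []).length hints)
  rw [hcols]
  unfold render
  apply List.map_congr_left
  intro r _
  apply List.map_congr_left
  intro c _
  exact bCell_eq_contains _ hints r c

-- ===== VERDICT (by name: the statement is the Claim_ definition above) =====
theorem generate_maze_spec : Claim_equal_generate_maze := by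
  intro n m hints _ _
  show generate_maze n m hints = generate_maze_alt n m hints
  rw [A_eq_render, B_eq_render]
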